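-- pv_equiv track=rewrite | github.com/timgith/data-mining | ExemplarClusteringBackend.py | find_exemplars
-- ===== SOURCE A (Python) =====
-- def find_exemplars(Y, partitions):
--     exemplars = []
--     for i in range(len(partitions)):
--         exemplars.append([])
--     for exemplar in Y:
--         i = 0
--         for partition in partitions:
--             if exemplar in partition:
--                 exemplars[i].append(exemplar)
--                 break
--             i += 1
--     count = 0
--     for cluster in exemplars:
--         count += len(cluster)
--     return exemplars
-- ===== SOURCE B (Python) =====
-- def find_exemplars(Y, partitions):
--     # Different decomposition: iterate partitions once, keeping `seen` =
--     # elements of earlier partitions; cluster i = Y-elements in partition i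
--     # and not in any earlier partition. Same return value as A.
--     clusters = []
--     seen = []
--     for partition in partitions:
--         clusters.append([e for e in Y if e in partition and e not in seen])
--         seen.extend(partition)
--     return clusters
-- ===== Notes on version B (the rewrite author's own statement) =====
-- stated objective: simpler
-- what changed: B drops A's dead count loop and inverts the traversal: instead of scanning partitions per Y-element into pre-allocated slots, it iterates partitions once, filtering Y against the current partition minus a running 'seen' list of earlier partitions' elements.
import Mathlib
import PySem

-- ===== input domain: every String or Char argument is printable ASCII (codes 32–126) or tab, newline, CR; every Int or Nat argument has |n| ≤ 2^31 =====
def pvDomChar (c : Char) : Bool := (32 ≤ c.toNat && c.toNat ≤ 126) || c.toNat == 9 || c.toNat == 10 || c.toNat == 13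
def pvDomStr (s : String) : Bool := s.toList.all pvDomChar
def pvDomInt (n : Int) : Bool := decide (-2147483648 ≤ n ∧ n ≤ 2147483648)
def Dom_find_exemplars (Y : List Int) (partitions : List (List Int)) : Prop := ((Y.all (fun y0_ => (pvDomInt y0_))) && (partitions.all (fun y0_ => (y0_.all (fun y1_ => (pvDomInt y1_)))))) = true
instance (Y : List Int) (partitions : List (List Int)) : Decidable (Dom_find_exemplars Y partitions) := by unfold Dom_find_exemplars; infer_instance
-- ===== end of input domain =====

-- B replaces A's per-element scan over partitions by one pass over partitions
-- filtering Y against a running 'seen' list (objective: simpler; A's unused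
-- count loop is dropped — it does not affect the return value).

-- ===== PORT A =====
-- inner 'for partition in partitions: if exemplar in partition: append; break; i += 1'
def assignA (ex : List (List Int)) (ps : List (List Int)) (i : Nat) (y : Int) : List (List Int) :=
  match ps with
  | [] => ex
  | p :: rest =>
      if p.contains y then ex.set i (ex.getD i [] ++ [y])
      else assignA ex rest (i + 1) y

def find_exemplars (Y : List Int) (partitions : List (List Int)) : List (List Int) :=
  -- 'exemplars = []; for i in range(len(partitions)): exemplars.append([])'
  let exemplars := partitions.map (fun _ => ([] : List Int))
  -- 'for exemplar in Y: …'  (the trailing count loop computes an unused value)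
  Y.foldl (fun ex y => assignA ex partitions 0 y) exemplars

-- ===== PORT B =====
def find_exemplars_alt (Y : List Int) (partitions : List (List Int)) : List (List Int) :=
  (partitions.foldl
    (fun (st : List (List Int) × List Int) p =>
      (st.1 ++ [Y.filter (fun e => p.contains e && !st.2.contains e)], st.2 ++ p))
    ([], [])).1

-- ===== PRECONDITION & SPEC =====
def Spec_find_exemplars (Y : List Int) (partitions : List (List Int)) (out : List (List Int)) : Prop := out = find_exemplars_alt Y partitions
instance (Y : List Int) (partitions : List (List Int)) (out : List (List Int)) : Decidable (Spec_find_exemplars Y partitions out) := by unfold Spec_find_exemplars; infer_instance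

-- ===== CLAIM (what is proved, stated in full; the proofs are below) =====
def Claim_equal_find_exemplars : Prop := ∀ (Y : List Int) (partitions : List (List Int)), Dom_find_exemplars Y partitions → Spec_find_exemplars Y partitions (find_exemplars Y partitions)

-- ===== LEMMAS AND PROOFS =====

-- index of the first partition containing y
def firstIdx (y : Int) : List (List Int) → Option Nat
  | [] => none
  | p :: rest => if p.contains y then some 0 else (firstIdx y rest).map (· + 1)

-- direct-recursion form of B's loop
def bLoop (Y : List Int) (seen : List Int) : List (List Int) → List (List Int)
  | [] => []
  | p :: rest =>
      Y.filter (fun e => p.contains e && !seen.contains e) :: bLoop Y (seen ++ p) rest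

theorem assignA_eq (ex : List (List Int)) (ps : List (List Int)) (i : Nat) (y : Int) :
    assignA ex ps i y =
      match firstIdx y ps with
      | none => ex
      | some k => ex.set (i + k) (ex.getD (i + k) [] ++ [y]) := by
  induction ps generalizing i with
  | nil => rfl
  | cons p rest ih =>
      show (if p.contains y then ex.set i (ex.getD i [] ++ [y]) else assignA ex rest (i + 1) y) = _
      by_cases h : p.contains y
      · rw [if_pos h]
        have h0 : firstIdx y (p :: rest) = some 0 := by
          simp [firstIdx, show y ∈ p by simpa using h]
        rw [h0]
        simp
      · rw [if_neg h, ih]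
        have h' : ¬ y ∈ p := by simpa using h
        have h1 : firstIdx y (p :: rest) = (firstIdx y rest).map (· + 1) := by
          simp [firstIdx, h']
        rw [h1]
        cases hf : firstIdx y rest with
        | none => simp
        | some k =>
            simp only [Option.map_some]
            have e : i + 1 + k = i + (k + 1) := by omega
            rw [e]

theorem step_eq (ex : List (List Int)) (ps : List (List Int)) (y : Int) :
    assignA ex ps 0 y =
      ex.mapIdx (fun j c => c ++ (if firstIdx y ps = some j then [y] else [])) := by
  rw [assignA_eq]
  cases hf : firstIdx y ps with
  | none =>
      simp only
      refine (List.ext_getElem (by simp) ?_).symm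
      intro j h1 h2
      simp
  | some k =>
      simp only [Nat.zero_add]
      refine List.ext_getElem (by simp) ?_
      intro j h1 h2
      by_cases hj : k = j
      · subst hj
        have hk : k < ex.length := by simpa using h1
        simp [List.getD_eq_getElem?_getD, List.getElem?_eq_getElem hk]
      · simp [hj]

theorem foldA_eq (Y : List Int) (ps : List (List Int)) (ex : List (List Int)) :
    Y.foldl (fun ex y => assignA ex ps 0 y) ex =
      ex.mapIdx (fun j c => c ++ Y.filter (fun y => firstIdx y ps == some j)) := by
  induction Y generalizing ex with
  | nil =>
      refine (List.ext_getElem (by simp) ?_).symm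
      intro j h1 h2
      simp
  | cons y rest ih =>
      simp only [List.foldl_cons]
      rw [ih, step_eq]
      refine List.ext_getElem (by simp) ?_
      intro j h1 h2
      by_cases h : firstIdx y ps = some j <;> simp [List.filter_cons, h]

theorem bLoop_eq (Y : List Int) (ps : List (List Int)) (seen : List Int) :
    bLoop Y seen ps =
      (List.range ps.length).map
        (fun j => Y.filter (fun y => !seen.contains y && (firstIdx y ps == some j))) := by
  induction ps generalizing seen with
  | nil => rfl
  | cons p rest ih =>
      simp only [bLoop, List.length_cons, List.range_succ_eq_map, List.map_cons, List.map_map]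
      congr 1
      · apply List.filter_congr
        intro y _
        by_cases h : y ∈ p <;> simp [firstIdx, h, Bool.and_comm]
      · rw [ih (seen ++ p)]
        apply List.map_congr_left
        intro j _
        apply List.filter_congr
        intro y _
        simp only [firstIdx]
        by_cases h : y ∈ p
        · simp [h]
        · cases hf : firstIdx y rest with
          | none => simp [h]
          | some k =>
              simp only [Option.map_some]
              by_cases hk : k = j <;> simp [h, hk]

theorem foldB_eq (Y : List Int) (ps : List (List Int)) (acc : List (List Int)) (seen : List Int) :
    (ps.foldl
      (fun (st : List (List Int) × List Int) p =>
        (st.1 ++ [Y.filter (fun e => p.contains e && !st.2.contains e)], st.2 ++ p))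
      (acc, seen)).1 = acc ++ bLoop Y seen ps := by
  induction ps generalizing acc seen with
  | nil => simp [bLoop]
  | cons p rest ih =>
      simp only [List.foldl_cons, bLoop]
      rw [ih]
      simp

-- ===== VERDICT (by name: the statement is the Claim_ definition above) =====
theorem find_exemplars_spec : Claim_equal_find_exemplars := by
  intro Y partitions _
  show find_exemplars Y partitions = find_exemplars_alt Y partitions
  unfold find_exemplars find_exemplars_alt
  rw [foldB_eq, foldA_eq, bLoop_eq]
  refine List.ext_getElem (by simp) ?_
  intro j h1 h2
  simp
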